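-- pv_equiv track=rewrite | github.com/miliar/Code_Jam_Webscraper | solutions_python/solutions_year16_round0_nr4/1616.py | complexify
-- ===== SOURCE A (Python) =====
-- from copy import copy
--
-- basestring = (str, bytes)
--
-- def complexify(original, c):
--     # L = 0, G = 1
--     k = len(original)
--     orig_ls = list(original)
--     fractal = copy(orig_ls)
--
--     while c > 1:
--         for ix, e in enumerate(fractal):
--             if e == 0:
--                 fractal[ix] = orig_ls
--             elif e == 1:
--                 fractal[ix] = [1] * k
--             else:
--                 raise Exception("FUUUUCK")
--         fractal = flatten(fractal)
--         c -= 1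
--     return fractal
--
-- def flatten(x):
--     result = []
--     for el in x:
--         if hasattr(el, "__iter__") and not isinstance(el, basestring):
--             result.extend(flatten(el))
--         else:
--             result.append(el)
--     return result
-- ===== SOURCE B (Python) =====
-- def complexify(original, c):
--     # Direct per-position base-k digit decomposition instead of repeated
--     # expand-and-flatten passes.
--     if c <= 1:
--         return list(original)
--     for e in original:
--         if e != 0 and e != 1:
--             raise Exception("FUUUUCK")
--     k = len(original)
--     out = []
--     for i in range(k ** c):
--         n, rest = divmod(i, k)
--         v = original[rest]
--         for _ in range(c - 1):
--             n, d = divmod(n, k)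
--             if original[d] == 1:
--                 v = 1
--         out.append(v)
--     return out
-- ===== Notes on version B (the rewrite author's own statement) =====
-- stated objective: alternative
-- what changed: Replaces the c-1 rounds of expand-and-flatten (rebuilding the whole list each round) with a single pass over the k**c output positions, computing each element directly from the base-k digits of its index.
import Mathlib
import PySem

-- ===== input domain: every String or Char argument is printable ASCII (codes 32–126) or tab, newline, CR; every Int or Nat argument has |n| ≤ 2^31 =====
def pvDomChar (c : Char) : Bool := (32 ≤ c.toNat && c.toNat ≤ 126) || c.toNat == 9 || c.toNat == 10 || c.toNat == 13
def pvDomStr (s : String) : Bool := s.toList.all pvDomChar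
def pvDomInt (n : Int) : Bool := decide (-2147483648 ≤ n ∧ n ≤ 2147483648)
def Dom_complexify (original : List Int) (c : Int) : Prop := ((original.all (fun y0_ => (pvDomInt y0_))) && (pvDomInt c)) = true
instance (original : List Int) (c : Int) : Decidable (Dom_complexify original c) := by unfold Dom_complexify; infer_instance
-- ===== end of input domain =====

-- B replaces A's repeated expand-and-flatten rounds by computing each of the k^c
-- output positions directly from the base-k digits of its index (alternative
-- decomposition, same cost). Where Python A raises Exception("FUUUUCK"), B raises
-- too; Pre_ excludes exactly those inputs.

-- ===== PORT A =====
-- one element's expansion: 0 -> orig_ls, 1 -> [1]*k; on any other value Python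
-- raises Exception("FUUUUCK") — Pre_complexify excludes those inputs, the port
-- returns [e] there (never reached inside Pre_).
def pvExpandA (orig : List Int) (k : Nat) (e : Int) : List Int :=
  if e = 0 then orig else if e = 1 then List.replicate k 1 else [e]

-- the while-loop: each round replaces every element by its expansion and
-- flattens (flatten of a list of flat lists = concatenation), c decreasing
def pvLoopA (orig : List Int) (k : Nat) : List Int → Nat → List Int
  | fractal, 0 => fractal
  | fractal, n+1 => pvLoopA orig k (fractal.flatMap (pvExpandA orig k)) n

def complexify (original : List Int) (c : Int) : List Int :=
  pvLoopA original original.length original (c - 1).toNat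

-- ===== PORT B =====
-- the inner digit loop: processes (c-1) base-k digits of n, least significant
-- first; v is upgraded to 1 whenever original[digit] == 1 (indices are < k so
-- List.getD is exact for Python's original[d])
def pvDigitsB (orig : List Int) (k : Nat) : Nat → Nat → Int → Int
  | 0, _, v => v
  | m+1, n, v => pvDigitsB orig k m (n / k) (if orig.getD (n % k) 0 = 1 then 1 else v)

-- B's validation loop raises exactly where A raises; Pre_complexify excludes
-- those inputs, so the port carries no counterpart of the raise.
def complexify_alt (original : List Int) (c : Int) : List Int :=
  if c ≤ 1 then original
  else
    let k := original.length
    (List.range (k ^ c.toNat)).map (fun i =>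
      pvDigitsB original k (c.toNat - 1) (i / k) (original.getD (i % k) 0))

-- ===== PRECONDITION & SPEC =====
-- Pre_ excludes exactly the inputs where A raises Exception("FUUUUCK"):
-- c > 1 with some element of original that is neither 0 nor 1 (B raises there too).
def Pre_complexify (original : List Int) (c : Int) : Prop :=
  1 < c → ∀ e ∈ original, e = 0 ∨ e = 1
instance (original : List Int) (c : Int) : Decidable (Pre_complexify original c) := by
  unfold Pre_complexify; infer_instance

def pvWitness_complexify : List Int × Int := ([0, 1, 0], 3)

def Spec_complexify (original : List Int) (c : Int) (out : List Int) : Prop := out = complexify_alt original c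
instance (original : List Int) (c : Int) (out : List Int) : Decidable (Spec_complexify original c out) := by unfold Spec_complexify; infer_instance

-- ===== CLAIM (what is proved, stated in full; the proofs are below) =====
def Claim_equal_complexify : Prop := ∀ (original : List Int) (c : Int), Dom_complexify original c → Pre_complexify original c → Spec_complexify original c (complexify original c)

-- ===== LEMMAS AND PROOFS =====

-- the value of position i after n expansion rounds: 1 if any of the n digits
-- above the last one selects a 1 in orig, otherwise the element at the last digit
def pvVal (orig : List Int) (k : Nat) (n : Nat) (i : Nat) : Int :=
  if (List.range n).any (fun j => orig.getD (i / k ^ (j+1) % k) 0 == 1) then 1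
  else orig.getD (i % k) 0

lemma pvDigitsB_eq (orig : List Int) (k : Nat) :
    ∀ (n m : Nat) (v : Int), pvDigitsB orig k n m v =
      if (List.range n).any (fun j => orig.getD (m / k ^ j % k) 0 == 1) then 1 else v := by
  intro n
  induction n with
  | zero => intro m v; simp [pvDigitsB]
  | succ n ih =>
    intro m v
    rw [pvDigitsB, ih, List.range_succ_eq_map]
    simp only [List.any_cons, List.any_map, Function.comp_def]
    have hd : ∀ j : Nat, m / k / k ^ j = m / k ^ (j + 1) := by
      intro j; rw [Nat.div_div_eq_div_mul, ← pow_succ']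
    simp only [hd, pow_zero, Nat.div_one, Nat.succ_eq_add_one]
    split_ifs <;> (simp_all; try tauto)

lemma getD_range_map {α : Type} (l : List α) (d : α) :
    (List.range l.length).map (fun i => l.getD i d) = l := by
  apply List.ext_getElem
  · simp
  · intro i h1 h2
    simp [List.getD, List.getElem?_eq_getElem h2]

-- flattening a block list whose blocks all have length k, indexed over a range
lemma flatMap_range_map {α : Type} (g : Nat → List α) (k : Nat) (d : α)
    (hlen : ∀ q, (g q).length = k) :
    ∀ L, ((List.range L).map g).flatten =
      (List.range (L * k)).map (fun i => (g (i / k)).getD (i % k) d) := by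
  intro L
  induction L with
  | zero => simp
  | succ L ih =>
    rcases Nat.eq_zero_or_pos k with hk | hk
    · subst hk
      have : ∀ q, g q = [] := fun q => List.eq_nil_of_length_eq_zero (hlen q)
      simp [this]
    · rw [List.range_succ, List.map_append, List.flatten_append, ih,
        Nat.succ_mul, List.range_add, List.map_append, List.map_map]
      congr 1
      simp only [List.map_cons, List.map_nil, List.flatten_cons, List.flatten_nil,
        List.append_nil, Function.comp_def]
      symm
      have : ∀ r, r ∈ List.range k →
          (g ((L * k + r) / k)).getD ((L * k + r) % k) d = (g L).getD r d := by
        intro r hr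
        have hr' : r < k := List.mem_range.mp hr
        have hdiv : (L * k + r) / k = L := by
          rw [Nat.add_comm, Nat.add_mul_div_right _ _ hk, Nat.div_eq_of_lt hr']; omega
        have hmod : (L * k + r) % k = r := by
          rw [Nat.add_comm, Nat.add_mul_mod_self_right, Nat.mod_eq_of_lt hr']
        rw [hdiv, hmod]
      rw [List.map_congr_left this,
        show List.range k = List.range (g L).length from by rw [hlen],
        getD_range_map]

-- applying one more round commutes to the outside
lemma pvLoopA_succ (orig : List Int) (k : Nat) :
    ∀ (n : Nat) (f : List Int), pvLoopA orig k f (n+1) =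
      (pvLoopA orig k f n).flatMap (pvExpandA orig k) := by
  intro n
  induction n with
  | zero => intro f; rfl
  | succ n ih => intro f; rw [pvLoopA, ih, pvLoopA]

lemma pvVal_mem (orig : List Int) (k n i : Nat)
    (h : ∀ e ∈ orig, e = 0 ∨ e = 1) : pvVal orig k n i = 0 ∨ pvVal orig k n i = 1 := by
  unfold pvVal
  split
  · right; rfl
  · rcases Nat.lt_or_ge (i % k) orig.length with hl | hl
    · exact h _ (List.getD_eq_getElem orig 0 hl ▸ orig.getElem_mem hl)
    · left; exact List.getD_eq_default orig 0 hl

lemma pvExpandA_len (orig : List Int) (e : Int) (he : e = 0 ∨ e = 1) :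
    (pvExpandA orig orig.length e).length = orig.length := by
  rcases he with h | h <;> simp [pvExpandA, h]

-- the main characterisation of A's loop on 0/1 lists
lemma pvLoopA_eq (orig : List Int) (h : ∀ e ∈ orig, e = 0 ∨ e = 1) :
    ∀ n : Nat, pvLoopA orig orig.length orig n =
      (List.range (orig.length ^ (n+1))).map (pvVal orig orig.length n) := by
  intro n
  induction n with
  | zero =>
    rw [pvLoopA]
    conv_lhs => rw [← getD_range_map orig 0]
    simp only [zero_add, pow_one]
    apply List.map_congr_left
    intro i hi
    have hi' : i < orig.length := List.mem_range.mp hi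
    simp [pvVal, Nat.mod_eq_of_lt hi']
  | succ n ih =>
    rw [pvLoopA_succ, ih, List.flatMap_def, List.map_map]
    simp only [Function.comp_def]
    rw [flatMap_range_map (fun q => pvExpandA orig orig.length (pvVal orig orig.length n q))
        orig.length 0 (fun q => pvExpandA_len orig _ (pvVal_mem orig _ n q h)),
      ← pow_succ]
    apply List.map_congr_left
    intro i hi
    have hi' : i < orig.length ^ (n + 1 + 1) := List.mem_range.mp hi
    have hk : 0 < orig.length := by
      by_contra hk0
      have : orig.length = 0 := by omega
      simp [this] at hi'
    have hmk : i % orig.length < orig.length := Nat.mod_lt _ hk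
    have hd : ∀ j : Nat, i / orig.length / orig.length ^ (j+1) = i / orig.length ^ (j+1+1) := by
      intro j; rw [Nat.div_div_eq_div_mul, ← pow_succ']
    have e1 : pvVal orig orig.length n (i / orig.length) =
        if (List.range n).any (fun j => orig.getD (i / orig.length ^ (j+1+1) % orig.length) 0 == 1)
        then 1 else orig.getD (i / orig.length % orig.length) 0 := by
      unfold pvVal; simp only [hd]
    have e2 : pvVal orig orig.length (n+1) i =
        if (orig.getD (i / orig.length % orig.length) 0 == 1 ||
            (List.range n).any (fun j => orig.getD (i / orig.length ^ (j+1+1) % orig.length) 0 == 1))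
        then 1 else orig.getD (i % orig.length) 0 := by
      unfold pvVal
      rw [List.range_succ_eq_map]
      simp only [List.any_cons, List.any_map, Function.comp_def, Nat.succ_eq_add_one,
        zero_add, pow_one]
    by_cases hA : ((List.range n).any fun j => orig.getD (i / orig.length ^ (j+1+1) % orig.length) 0 == 1) = true
    · have hv : pvVal orig orig.length n (i / orig.length) = 1 := by rw [e1, if_pos hA]
      rw [hv, e2, if_pos (by rw [Bool.or_eq_true]; exact Or.inr hA)]
      simp [pvExpandA, hmk]
    · have hv : pvVal orig orig.length n (i / orig.length) =
          orig.getD (i / orig.length % orig.length) 0 := by rw [e1, if_neg hA]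
      have hz : orig.getD (i / orig.length % orig.length) 0 = 0 ∨
          orig.getD (i / orig.length % orig.length) 0 = 1 := by
        rcases Nat.lt_or_ge (i / orig.length % orig.length) orig.length with hl | hl
        · exact h _ (List.getD_eq_getElem orig 0 hl ▸ orig.getElem_mem hl)
        · left; exact List.getD_eq_default orig 0 hl
      rcases hz with hz | hz
      · rw [hv, hz, e2, if_neg (by
          rw [Bool.or_eq_true]
          rintro (hb | hb)
          · rw [hz] at hb; exact absurd hb (by decide)
          · exact hA hb)]
        simp [pvExpandA]
      · rw [hv, hz, e2, if_pos (by rw [Bool.or_eq_true]; exact Or.inl (by rw [hz]; rfl))]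
        simp [pvExpandA, hmk]

-- ===== VERDICT (by name: the statement is the Claim_ definition above) =====
theorem complexify_spec : Claim_equal_complexify := by
  intro original c _ hpre
  unfold Spec_complexify complexify complexify_alt
  by_cases hc : c ≤ 1
  · have : (c - 1).toNat = 0 := by omega
    simp [this, pvLoopA, hc]
  · have hc1 : 1 < c := by omega
    have hn : (c - 1).toNat + 1 = c.toNat := by omega
    have hn' : c.toNat - 1 = (c - 1).toNat := by omega
    rw [if_neg hc]
    rw [pvLoopA_eq original (hpre hc1) ((c-1).toNat), hn, hn']
    apply List.map_congr_left
    intro i _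
    rw [pvDigitsB_eq]
    unfold pvVal
    have hd : ∀ j : Nat, i / original.length / original.length ^ j = i / original.length ^ (j+1) := by
      intro j; rw [Nat.div_div_eq_div_mul, ← pow_succ']
    simp only [hd]
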